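-- pv_equiv track=rewrite | github.com/james-ralph8555/fdnix | packages/containers/nixpkgs-indexer/src/extract_dependencies.py | prioritize_shards
-- ===== SOURCE A (Python) =====
-- from typing import List, Optional, Dict, Any
--
-- def is_problematic_shard(shard_name: str) -> bool:
--     """Check if a shard is known to be problematic and should be processed with extra care"""
--     # With by-name sharding, large individual prefixes are the main problematic shards
--     large_prefix_shards = {
--         'byname_large_li',  # 948 packages - largest shard
--         'byname_large_co',  # 284 packages
--         'byname_large_ca',  # 284 packages
--     }
--     return shard_name in large_prefix_shards
--
-- def prioritize_shards(shards: List[str]) -> List[str]: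
--     """Prioritize shards to process grouped shards first, then large shards last"""
--     grouped_shards = []
--     large_shards = []
--     problematic_shards = []
--
--     for shard in shards:
--         if shard.startswith('byname_group_'):
--             # Grouped shards are smaller and faster, process first
--             grouped_shards.append(shard)
--         elif shard.startswith('byname_large_'):
--             if is_problematic_shard(shard):
--                 # Very large shards that need special handling
--                 problematic_shards.append(shard)
--             else:
--                 # Regular large shards
--                 large_shards.append(shard)
--         else:
--             # Any remaining shards (shouldn't exist with by-name sharding)
--             grouped_shards.append(shard)
--
--     # Process in order: grouped (fast) -> large (medium) -> problematic (slow)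
--     # Sort within each category for consistent ordering
--     return (sorted(grouped_shards) +
--             sorted(large_shards) +
--             sorted(problematic_shards))
-- ===== SOURCE B (Python) =====
-- def is_problematic_shard(shard_name: str) -> bool:
--     large_prefix_shards = {
--         'byname_large_li',
--         'byname_large_co',
--         'byname_large_ca',
--     }
--     return shard_name in large_prefix_shards
--
-- def _rank(shard: str) -> int:
--     if shard.startswith('byname_group_'):
--         return 0
--     if shard.startswith('byname_large_'):
--         return 2 if is_problematic_shard(shard) else 1
--     return 0
--
-- def prioritize_shards(shards):
--     return sorted(shards, key=lambda s: (_rank(s), s))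
-- ===== Notes on version B (the rewrite author's own statement) =====
-- stated objective: simpler
-- what changed: Replaces the three-bucket partition loop plus three separate sorts and concatenation with a single sort over a composite key (priority rank, shard name).
import Mathlib
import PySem

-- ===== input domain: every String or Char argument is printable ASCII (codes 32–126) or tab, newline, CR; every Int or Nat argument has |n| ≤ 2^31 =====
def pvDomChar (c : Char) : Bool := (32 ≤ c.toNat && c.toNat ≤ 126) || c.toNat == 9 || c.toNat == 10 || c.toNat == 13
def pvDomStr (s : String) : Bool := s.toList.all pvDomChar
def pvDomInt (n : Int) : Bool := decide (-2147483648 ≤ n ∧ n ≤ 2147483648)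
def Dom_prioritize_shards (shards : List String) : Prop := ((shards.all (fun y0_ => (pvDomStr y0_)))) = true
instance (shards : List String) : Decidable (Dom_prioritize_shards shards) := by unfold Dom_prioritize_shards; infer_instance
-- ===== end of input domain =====

-- B replaces A's three-bucket partition + three sorts with one sort by the composite key (rank, name); objective: simpler.

-- ===== PORT A =====
def is_problematic_shard (shard_name : String) : Bool :=
  PySem.Set.contains (PySem.Set.ofList ["byname_large_li", "byname_large_co", "byname_large_ca"]) shard_name

def prioritize_shards (shards : List String) : List String :=
  let st := shards.foldl
    (fun (acc : List String × List String × List String) shard =>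
      if PySem.Str.startswith shard "byname_group_" then
        (acc.1 ++ [shard], acc.2.1, acc.2.2)
      else if PySem.Str.startswith shard "byname_large_" then
        if is_problematic_shard shard then
          (acc.1, acc.2.1, acc.2.2 ++ [shard])
        else
          (acc.1, acc.2.1 ++ [shard], acc.2.2)
      else
        (acc.1 ++ [shard], acc.2.1, acc.2.2))
    ([], [], [])
  PySem.List.sorted st.1 (fun x => x) ++
    PySem.List.sorted st.2.1 (fun x => x) ++
    PySem.List.sorted st.2.2 (fun x => x)

-- ===== PORT B =====
def shardRank (shard : String) : Int :=
  if PySem.Str.startswith shard "byname_group_" then 0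
  else if PySem.Str.startswith shard "byname_large_" then
    (if is_problematic_shard shard then 2 else 1)
  else 0

-- Python's tuple key (rank(s), s) compares lexicographically: Lex (Int × String) is exact.
def prioritize_shards_alt (shards : List String) : List String :=
  PySem.List.sorted shards (fun s => toLex (shardRank s, s))

-- ===== PRECONDITION & SPEC =====
def Spec_prioritize_shards (shards : List String) (out : List String) : Prop := out = prioritize_shards_alt shards
instance (shards : List String) (out : List String) : Decidable (Spec_prioritize_shards shards out) := by unfold Spec_prioritize_shards; infer_instance

-- ===== CLAIM (what is proved, stated in full; the proofs are below) =====
def Claim_equal_prioritize_shards : Prop := ∀ (shards : List String), Dom_prioritize_shards shards → Spec_prioritize_shards shards (prioritize_shards shards)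

-- ===== LEMMAS AND PROOFS =====

-- the three bucket predicates, in A's branch order
def pG (s : String) : Bool := PySem.Str.startswith s "byname_group_" || !PySem.Str.startswith s "byname_large_"
def pL (s : String) : Bool := !PySem.Str.startswith s "byname_group_" && PySem.Str.startswith s "byname_large_" && !is_problematic_shard s
def pP (s : String) : Bool := !PySem.Str.startswith s "byname_group_" && PySem.Str.startswith s "byname_large_" && is_problematic_shard s

lemma foldA_eq (shards : List String) (g l p : List String) :
    shards.foldl
      (fun (acc : List String × List String × List String) shard =>
        if PySem.Str.startswith shard "byname_group_" then
          (acc.1 ++ [shard], acc.2.1, acc.2.2)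
        else if PySem.Str.startswith shard "byname_large_" then
          if is_problematic_shard shard then
            (acc.1, acc.2.1, acc.2.2 ++ [shard])
          else
            (acc.1, acc.2.1 ++ [shard], acc.2.2)
        else
          (acc.1 ++ [shard], acc.2.1, acc.2.2))
      (g, l, p)
    = (g ++ shards.filter pG, l ++ shards.filter pL, p ++ shards.filter pP) := by
  induction shards generalizing g l p with
  | nil => simp
  | cons x t ih =>
    cases hg : PySem.Str.startswith x "byname_group_" <;>
      cases hl : PySem.Str.startswith x "byname_large_" <;>
      cases hp : is_problematic_shard x <;>
    · have bG : pG x = (PySem.Str.startswith x "byname_group_" || !PySem.Str.startswith x "byname_large_") := rfl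
      have bL : pL x = (!PySem.Str.startswith x "byname_group_" && PySem.Str.startswith x "byname_large_" && !is_problematic_shard x) := rfl
      have bP : pP x = (!PySem.Str.startswith x "byname_group_" && PySem.Str.startswith x "byname_large_" && is_problematic_shard x) := rfl
      rw [hg, hl] at bG
      rw [hg, hl, hp] at bL bP
      simp only [Bool.not_true, Bool.not_false, Bool.or_true, Bool.or_false, Bool.true_or,
        Bool.false_or, Bool.and_true, Bool.and_false, Bool.true_and, Bool.false_and] at bG bL bP
      simp only [List.foldl_cons, List.filter_cons]
      rw [hg, hl, hp, bG, bL, bP]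
      simp only [Bool.false_eq_true, eq_self_iff_true, if_true, if_false]
      rw [ih]
      simp

lemma partition3_perm (shards : List String) :
    (shards.filter pG ++ shards.filter pL ++ shards.filter pP).Perm shards := by
  induction shards with
  | nil => simp
  | cons x t ih =>
    cases hg : PySem.Str.startswith x "byname_group_" <;>
      cases hl : PySem.Str.startswith x "byname_large_" <;>
      cases hp : is_problematic_shard x <;>
    · have bG : pG x = (PySem.Str.startswith x "byname_group_" || !PySem.Str.startswith x "byname_large_") := rfl
      have bL : pL x = (!PySem.Str.startswith x "byname_group_" && PySem.Str.startswith x "byname_large_" && !is_problematic_shard x) := rfl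
      have bP : pP x = (!PySem.Str.startswith x "byname_group_" && PySem.Str.startswith x "byname_large_" && is_problematic_shard x) := rfl
      rw [hg, hl] at bG
      rw [hg, hl, hp] at bL bP
      simp only [Bool.not_true, Bool.not_false, Bool.or_true, Bool.or_false, Bool.true_or,
        Bool.false_or, Bool.and_true, Bool.and_false, Bool.true_and, Bool.false_and] at bG bL bP
      simp only [List.filter_cons]
      rw [bG, bL, bP]
      simp only [Bool.false_eq_true, eq_self_iff_true, if_true, if_false]
      first
      | -- x lands in the grouped bucket (first block of the concatenation)
        (simp only [List.cons_append]; exact ih.cons x)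
      | -- x lands in the problematic bucket (last block)
        exact List.perm_middle.trans (ih.cons x)
      | -- x lands in the large bucket (middle block)
        (rw [List.append_assoc, List.cons_append]
         exact List.perm_middle.trans
           ((show (List.filter pG t ++ (List.filter pL t ++ List.filter pP t)).Perm t by
              rw [← List.append_assoc]; exact ih).cons x))

def shardKey (s : String) : Lex (Int × String) := toLex (shardRank s, s)

lemma shardKey_injective : Function.Injective shardKey := by
  intro a b h
  have := congrArg (fun x => (ofLex x).2) h
  simpa [shardKey] using this

lemma rank_of_pG {s : String} (h : pG s = true) : shardRank s = 0 := by
  unfold pG at h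
  unfold shardRank
  rcases Bool.or_eq_true_iff.mp h with h1 | h1
  · rw [h1]
    rfl
  · simp only [Bool.not_eq_true'] at h1
    rw [h1]
    split_ifs with a b c <;> first | rfl | exact b.elim

lemma rank_of_pL {s : String} (h : pL s = true) : shardRank s = 1 := by
  unfold pL at h
  simp only [Bool.and_eq_true, Bool.not_eq_true'] at h
  unfold shardRank
  rw [h.1.1, h.1.2, h.2]
  rfl

lemma rank_of_pP {s : String} (h : pP s = true) : shardRank s = 2 := by
  unfold pP at h
  simp only [Bool.and_eq_true, Bool.not_eq_true'] at h
  unfold shardRank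
  rw [h.1.1, h.1.2, h.2]
  rfl

-- a sorted bucket in which every element has the same rank is pairwise ≤ under the composite key
lemma bucket_pairwise (xs : List String) (pb : String → Bool) (r : Int)
    (hr : ∀ s, pb s = true → shardRank s = r) :
    List.Pairwise (fun a b => shardKey a ≤ shardKey b)
      (PySem.List.sorted (xs.filter pb) (fun x => x)) := by
  refine (PySem.List.sorted_pairwise (xs.filter pb) (fun x => x)).imp_of_mem ?_
  intro a b ha hb hle
  have ha' := List.of_mem_filter ((PySem.List.mem_sorted _ _ _ a).mp ha)
  have hb' := List.of_mem_filter ((PySem.List.mem_sorted _ _ _ b).mp hb)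
  unfold shardKey
  rw [Prod.Lex.toLex_le_toLex]
  exact Or.inr ⟨by rw [hr a ha', hr b hb'], hle⟩

lemma cross_le {a b : String} {ra rb : Int} (hra : shardRank a = ra) (hrb : shardRank b = rb)
    (h : ra < rb) : shardKey a ≤ shardKey b := by
  unfold shardKey
  rw [Prod.Lex.toLex_le_toLex]
  exact Or.inl (by omega)

-- ===== VERDICT (by name: the statement is the Claim_ definition above) =====
theorem prioritize_shards_spec : Claim_equal_prioritize_shards := by
  intro shards _
  unfold Spec_prioritize_shards prioritize_shards prioritize_shards_alt
  rw [foldA_eq]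
  simp only [List.nil_append]
  -- both sides are permutations of shards and pairwise ≤ under the injective key shardKey
  have permA : (PySem.List.sorted (shards.filter pG) (fun x => x) ++
      PySem.List.sorted (shards.filter pL) (fun x => x) ++
      PySem.List.sorted (shards.filter pP) (fun x => x)).Perm shards := by
    refine List.Perm.trans ?_ (partition3_perm shards)
    exact ((PySem.List.sorted_perm _ _ _).append (PySem.List.sorted_perm _ _ _)).append
      (PySem.List.sorted_perm _ _ _)
  have permB : (PySem.List.sorted shards (fun s => toLex (shardRank s, s))).Perm shards :=
    PySem.List.sorted_perm _ _ _
  refine PySem.List.eq_of_perm_of_pairwise_le_of_injective shardKey shardKey_injective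
    (permA.trans permB.symm) ?_ ?_
  · -- the concatenation is pairwise ≤
    have memRank : ∀ (pb : String → Bool) (r : Int), (∀ s, pb s = true → shardRank s = r) →
        ∀ a ∈ PySem.List.sorted (shards.filter pb) (fun x => x), shardRank a = r := by
      intro pb r hr a ha
      exact hr a (List.of_mem_filter ((PySem.List.mem_sorted _ _ _ a).mp ha))
    rw [List.pairwise_append]
    refine ⟨?_, bucket_pairwise shards pP 2 (fun s => rank_of_pP), ?_⟩
    · rw [List.pairwise_append]
      refine ⟨bucket_pairwise shards pG 0 (fun s => rank_of_pG),
        bucket_pairwise shards pL 1 (fun s => rank_of_pL), ?_⟩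
      intro a ha b hb
      exact cross_le (memRank pG 0 (fun s => rank_of_pG) a ha)
        (memRank pL 1 (fun s => rank_of_pL) b hb) (by norm_num)
    · intro a ha b hb
      rcases List.mem_append.mp ha with ha' | ha'
      · exact cross_le (memRank pG 0 (fun s => rank_of_pG) a ha')
          (memRank pP 2 (fun s => rank_of_pP) b hb) (by norm_num)
      · exact cross_le (memRank pL 1 (fun s => rank_of_pL) a ha')
          (memRank pP 2 (fun s => rank_of_pP) b hb) (by norm_num)
  · exact PySem.List.sorted_pairwise shards (fun s => toLex (shardRank s, s))
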